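-- pv_equiv track=rewrite | github.com/AlexanderTirik/PuckwheatBarser | backend/services.py | parse_weight
-- ===== SOURCE A (Python) =====
-- def parse_weight(weight):
--     """
--     Parse the numerical value of the weight from a string
--     """
--     if weight.endswith("кг"):
--         return 1000 * int(weight[:-2])
--     else:
--         if weight.count("x"):
--             number, _, weight_one = weight.partition("x")
--             return int(number) * parse_weight(weight_one)
--         else:
--             return int(weight[:-1])
-- ===== SOURCE B (Python) =====
-- def parse_weight(weight):
--     """
--     Parse the numerical value of the weight from a string
--     """
--     if weight.endswith("кг"):
--         return 1000 * int(weight[:-2])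
--     result = 1
--     cur = []
--     for ch in weight:
--         if ch == 'x':
--             result *= int(''.join(cur))
--             cur = []
--         else:
--             cur.append(ch)
--     return result * int(''.join(cur[:-1]))
-- ===== Notes on version B (the rewrite author's own statement) =====
-- stated objective: simpler
-- what changed: Replaces A's recursive partition('x') descent (which re-scans the rest of the string and re-checks the suffix at every level) with a single left-to-right scan that accumulates the current segment and multiplies a running product at each 'x'; the top-level kg fast path is kept as-is.
import Mathlib
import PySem

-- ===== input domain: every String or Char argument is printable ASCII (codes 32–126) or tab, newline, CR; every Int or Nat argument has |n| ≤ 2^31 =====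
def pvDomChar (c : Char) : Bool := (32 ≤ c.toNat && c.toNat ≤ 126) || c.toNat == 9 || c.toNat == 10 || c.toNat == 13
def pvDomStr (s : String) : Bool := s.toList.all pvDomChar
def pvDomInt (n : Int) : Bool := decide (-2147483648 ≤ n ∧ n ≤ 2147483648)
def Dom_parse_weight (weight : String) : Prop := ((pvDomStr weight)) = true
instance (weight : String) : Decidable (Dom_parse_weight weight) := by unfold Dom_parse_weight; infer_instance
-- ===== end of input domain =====

-- B replaces A's recursive partition("x") descent by a single left-to-right scan of the
-- characters with a running product; objective: simpler (one pass, no recursion).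

-- int(cs): Pre_parse_weight excludes every input on which some int() call raises,
-- so the default 0 is never observed on admitted inputs.
def pvIntOr0 (cs : List Char) : Int := (PySem.Int.ofChars? cs).getD 0

-- ===== PORT A =====
-- A works on the character list; parse_weight wraps it (PySem.Str.* are the toList wrappers).
def parse_weight_rec (cs : List Char) : Int :=
  if PySem.Chars.endswith cs "кг".toList then
    1000 * pvIntOr0 (PySem.List.slice cs none (some (-2)))
  else if h : PySem.Chars.count cs ['x'] ≠ 0 then
    -- number, _, weight_one = weight.partition("x")  (exact: single-char separator, first occurrence)
    let number := cs.takeWhile (fun c => c != 'x')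
    let weight_one := cs.drop (number.length + 1)
    pvIntOr0 number * parse_weight_rec weight_one
  else
    pvIntOr0 (PySem.List.slice cs none (some (-1)))
termination_by cs.length
decreasing_by
  cases cs with
  | nil => exact absurd (by decide) h
  | cons c t => simp only [List.length_drop, List.length_cons]; omega

def parse_weight (weight : String) : Int := parse_weight_rec weight.toList

-- ===== PORT B =====
def parse_weight_alt (weight : String) : Int :=
  if PySem.Chars.endswith weight.toList "кг".toList then
    1000 * pvIntOr0 (PySem.List.slice weight.toList none (some (-2)))
  else
    -- result = 1; cur = []; for ch in weight: …
    let st := weight.toList.foldl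
      (fun (acc : Int × List Char) ch =>
        if ch = 'x' then (acc.1 * pvIntOr0 acc.2, ([] : List Char))
        else (acc.1, acc.2 ++ [ch]))
      (1, ([] : List Char))
    st.1 * pvIntOr0 (PySem.List.slice st.2 none (some (-1)))

-- ===== PRECONDITION & SPEC =====
-- Pre_ excludes exactly the inputs on which A raises ValueError from an int() call: for a
-- "кг"-suffixed string, weight[:-2] must parse as an int; otherwise every 'x'-separated
-- segment but the last must parse, and so must the last segment with its unit char dropped.
-- (Inside Dom the "кг" branch is vacuous — 'к','г' are not printable ASCII — but Pre_ states
-- A's full returning domain all the same.)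
def Pre_parse_weight (weight : String) : Prop :=
  if PySem.Chars.endswith weight.toList "кг".toList then
    PySem.Int.ofChars? (PySem.List.slice weight.toList none (some (-2))) ≠ none
  else
    (∀ p ∈ (PySem.Chars.splitOn weight.toList ['x']).dropLast, PySem.Int.ofChars? p ≠ none) ∧
    PySem.Int.ofChars? ((PySem.Chars.splitOn weight.toList ['x']).getLastD []).dropLast ≠ none
instance (weight : String) : Decidable (Pre_parse_weight weight) := by unfold Pre_parse_weight; infer_instance

def pvWitness_parse_weight : String := "2x5k"

def Spec_parse_weight (weight : String) (out : Int) : Prop := out = parse_weight_alt weight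
instance (weight : String) (out : Int) : Decidable (Spec_parse_weight weight out) := by unfold Spec_parse_weight; infer_instance

-- ===== CLAIM (what is proved, stated in full; the proofs are below) =====
def Claim_equal_parse_weight : Prop := ∀ (weight : String), Dom_parse_weight weight → Pre_parse_weight weight → Spec_parse_weight weight (parse_weight weight)

-- ===== LEMMAS AND PROOFS =====

-- B's loop body, named for the lemmas below
def pvStep (acc : Int × List Char) (ch : Char) : Int × List Char :=
  if ch = 'x' then (acc.1 * pvIntOr0 acc.2, ([] : List Char))
  else (acc.1, acc.2 ++ [ch])

lemma pvStep_foldl (cs : List Char) :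
    cs.foldl (fun (acc : Int × List Char) ch =>
        if ch = 'x' then (acc.1 * pvIntOr0 acc.2, ([] : List Char))
        else (acc.1, acc.2 ++ [ch])) (1, ([] : List Char))
      = cs.foldl pvStep (1, ([] : List Char)) := rfl

-- the loop step on an 'x' / on any other character
lemma pvStep_x (r : Int) (pre : List Char) : pvStep (r, pre) 'x' = (r * pvIntOr0 pre, []) := by
  simp [pvStep]

lemma pvPrefx (c : Char) (t : List Char) (hc : c ≠ 'x') :
    (['x'].isPrefixOf (c :: t)) = false := by
  simp [List.isPrefixOf]
  intro he
  exact hc he.symm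

-- count.go for the one-character pattern ['x']
lemma pvGo_notmem : ∀ (fuel : Nat) (cs : List Char) (acc : Nat), 'x' ∉ cs →
    PySem.Chars.count.go ['x'] fuel cs acc = acc := by
  intro fuel
  induction fuel with
  | zero => intro cs acc _; cases cs <;> simp [PySem.Chars.count.go]
  | succ n ih =>
    intro cs acc h
    cases cs with
    | nil => simp [PySem.Chars.count.go]
    | cons c t =>
      simp only [List.mem_cons, not_or] at h
      have hcne : c ≠ 'x' := by intro he; subst he; exact h.1 rfl
      simp [PySem.Chars.count.go, pvPrefx c t hcne, ih t acc h.2]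

lemma pvGo_ge : ∀ (fuel : Nat) (cs : List Char) (acc : Nat),
    acc ≤ PySem.Chars.count.go ['x'] fuel cs acc := by
  intro fuel
  induction fuel with
  | zero => intro cs acc; cases cs <;> simp [PySem.Chars.count.go]
  | succ n ih =>
    intro cs acc
    cases cs with
    | nil => simp [PySem.Chars.count.go]
    | cons c t =>
      by_cases hc : c = 'x'
      · subst hc
        have : (['x'].isPrefixOf ('x' :: t)) = true := by simp [List.isPrefixOf]
        simp only [PySem.Chars.count.go, this, if_pos]
        calc acc ≤ acc + 1 := Nat.le_succ acc
          _ ≤ _ := by simpa using ih (List.drop 1 ('x' :: t)) (acc + 1)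
      · simpa [PySem.Chars.count.go, pvPrefx c t hc] using ih t acc

lemma pvGo_mem : ∀ (fuel : Nat) (cs : List Char) (acc : Nat), cs.length ≤ fuel → 'x' ∈ cs →
    acc < PySem.Chars.count.go ['x'] fuel cs acc := by
  intro fuel
  induction fuel with
  | zero => intro cs acc hl hm; cases cs <;> simp_all
  | succ n ih =>
    intro cs acc hl hm
    cases cs with
    | nil => simp at hm
    | cons c t =>
      by_cases hc : c = 'x'
      · subst hc
        have hp : (['x'].isPrefixOf ('x' :: t)) = true := by simp [List.isPrefixOf]
        simp only [PySem.Chars.count.go, hp, if_pos]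
        calc acc < acc + 1 := Nat.lt_succ_self acc
          _ ≤ _ := by simpa using pvGo_ge n (List.drop 1 ('x' :: t)) (acc + 1)
      · have hp := pvPrefx c t hc
        have hm' : 'x' ∈ t := by rcases List.mem_cons.mp hm with h | h; exact absurd h.symm hc; exact h
        have hl' : t.length ≤ n := by simp at hl; omega
        simpa [PySem.Chars.count.go, hp] using ih t acc hl' hm'

lemma pvCountx_eq_zero_iff (cs : List Char) :
    PySem.Chars.count cs ['x'] = 0 ↔ 'x' ∉ cs := by
  constructor
  · intro h hm
    have := pvGo_mem cs.length cs 0 le_rfl hm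
    simp [PySem.Chars.count] at h
    omega
  · intro h
    simp [PySem.Chars.count, pvGo_notmem cs.length cs 0 h]

-- Dom strings never end with the non-ASCII "кг"
lemma pvNoKg (cs : List Char) (hd : ∀ c ∈ cs, pvDomChar c = true) :
    PySem.Chars.endswith cs "кг".toList = false := by
  by_contra h
  rw [Bool.not_eq_false] at h
  have hs := (PySem.Chars.endswith_iff cs "кг".toList).mp h
  obtain ⟨t, ht⟩ := hs
  have : 'г' ∈ cs := by
    rw [← ht]; simp [show "кг".toList = ['к', 'г'] from rfl]
  have := hd 'г' this
  simp [pvDomChar] at this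

-- splitting off the first 'x' (partition("x"))
lemma pvPartition (cs : List Char) (hm : 'x' ∈ cs) :
    cs = cs.takeWhile (fun c => c != 'x') ++ 'x' ::
         cs.drop ((cs.takeWhile (fun c => c != 'x')).length + 1) ∧
    'x' ∉ cs.takeWhile (fun c => c != 'x') := by
  induction cs with
  | nil => simp at hm
  | cons c t ih =>
    by_cases hc : c = 'x'
    · subst hc; simp [List.takeWhile]
    · have hm' : 'x' ∈ t := by rcases List.mem_cons.mp hm with h | h; exact absurd h.symm hc; exact h
      obtain ⟨h1, h2⟩ := ih hm'
      have hcb : (c != 'x') = true := by simp [hc]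
      constructor
      · simp only [List.takeWhile, hcb]
        conv_lhs => rw [show c :: t = c :: t from rfl]
        simp only [List.length_cons, List.drop_succ_cons, List.cons_append]
        exact congrArg (c :: ·) h1
      · simp only [List.takeWhile, hcb, List.mem_cons, not_or]
        exact ⟨fun he => hc he.symm, h2⟩

-- B's fold over a segment with no 'x' just accumulates the characters
lemma pvFold_noX : ∀ (cs : List Char) (r : Int) (pre : List Char), 'x' ∉ cs →
    cs.foldl pvStep (r, pre) = (r, pre ++ cs) := by
  intro cs
  induction cs with
  | nil => intro r pre _; simp
  | cons c t ih =>
    intro r pre h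
    simp only [List.mem_cons, not_or] at h
    have hc : ¬ (c = 'x') := fun he => h.1 he.symm
    simp [List.foldl_cons, pvStep, hc, ih r (pre ++ [c]) h.2]

-- the running product factors out of B's fold
lemma pvFold_scale : ∀ (cs : List Char) (r : Int) (pre : List Char),
    cs.foldl pvStep (r, pre)
      = (r * (cs.foldl pvStep (1, pre)).1, (cs.foldl pvStep (1, pre)).2) := by
  intro cs
  induction cs with
  | nil => intro r pre; simp
  | cons c t ih =>
    intro r pre
    by_cases hc : c = 'x'
    · subst hc
      rw [List.foldl_cons, List.foldl_cons, pvStep_x, pvStep_x,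
        ih (r * pvIntOr0 pre) [], ih (1 * pvIntOr0 pre) []]
      simp only [Prod.mk.injEq]
      exact ⟨by ring, trivial⟩
    · simp only [List.foldl_cons, pvStep, if_neg hc]
      exact ih r (pre ++ [c])

-- main: A's recursion computes B's one-pass fold, on Dom characters
lemma pvMain : ∀ (n : Nat) (cs : List Char), cs.length ≤ n → (∀ c ∈ cs, pvDomChar c = true) →
    parse_weight_rec cs
      = (cs.foldl pvStep (1, ([] : List Char))).1 *
        pvIntOr0 (PySem.List.slice (cs.foldl pvStep (1, ([] : List Char))).2 none (some (-1))) := by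
  intro n
  induction n with
  | zero =>
    intro cs hl _
    have hnil : cs = [] := by
      cases cs with
      | nil => rfl
      | cons c t => simp at hl
    subst hnil
    rw [parse_weight_rec]
    have h1 : PySem.Chars.endswith ([] : List Char) "кг".toList = false := by decide
    have h2 : PySem.Chars.count ([] : List Char) ['x'] = 0 := by decide
    rw [h1]
    simp [h2]
  | succ n ih =>
    intro cs hl hd
    rw [parse_weight_rec]
    rw [pvNoKg cs hd]
    simp only [Bool.false_eq_true, if_false]
    by_cases hcnt : PySem.Chars.count cs ['x'] ≠ 0
    · -- 'x' occurs: split at the first one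
      have hm : 'x' ∈ cs := by
        by_contra hnm
        exact hcnt ((pvCountx_eq_zero_iff cs).mpr hnm)
      obtain ⟨hsplit, hnx⟩ := pvPartition cs hm
      set a := cs.takeWhile (fun c => c != 'x') with ha
      set b := cs.drop (a.length + 1) with hb
      have hfold : cs.foldl pvStep (1, ([] : List Char))
          = (pvIntOr0 a * (b.foldl pvStep (1, ([] : List Char))).1,
             (b.foldl pvStep (1, ([] : List Char))).2) := by
        conv_lhs => rw [hsplit]
        rw [List.foldl_append, pvFold_noX a 1 [] hnx, List.foldl_cons]
        simp only [List.nil_append]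
        rw [pvStep_x, one_mul, pvFold_scale b (pvIntOr0 a) []]
      have hlb : b.length ≤ n := by
        have : cs.length = a.length + 1 + b.length := by
          conv_lhs => rw [hsplit]
          simp [List.length_append]; omega
        omega
      have hdb : ∀ c ∈ b, pvDomChar c = true := by
        intro c hc
        apply hd
        rw [hsplit]
        simp [hc]
      rw [dif_pos hcnt, hfold]
      simp only
      rw [ih b hlb hdb]
      ring
    · -- no 'x': the fold only accumulates characters
      have hnm : 'x' ∉ cs := (pvCountx_eq_zero_iff cs).mp (by omega)
      rw [dif_neg hcnt, pvFold_noX cs 1 [] hnm]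
      simp

-- ===== VERDICT (by name: the statement is the Claim_ definition above) =====
theorem parse_weight_spec : Claim_equal_parse_weight := by
  intro weight hdom _
  unfold Spec_parse_weight parse_weight parse_weight_alt
  have hd : ∀ c ∈ weight.toList, pvDomChar c = true := by
    intro c hc
    exact List.all_eq_true.mp hdom c hc
  rw [pvNoKg weight.toList hd]
  simp only [Bool.false_eq_true, if_false, pvStep_foldl]
  exact pvMain weight.toList.length weight.toList le_rfl hd
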